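-- pv_equiv track=rewrite | github.com/carosaav/SimulAI | Rdsca/Complete.py | ruta_orden
-- ===== SOURCE A (Python) =====
-- def ruta_orden(r):
--     parte_a = []
--     parte_b = []
--     if len(r) > 0:
--         for x in r:
--             if len(x) == 3:
--                 parte_a.append(x)
--             else:
--                 parte_b.append(x)
--         parte_a.sort()
--         parte_b.sort()
--     return parte_a + parte_b
-- ===== SOURCE B (Python) =====
-- def ruta_orden(r):
--     return sorted(r, key=lambda x: (len(x) != 3, x))
-- ===== Notes on version B (the rewrite author's own statement) =====
-- stated objective: simpler
-- what changed: Replaced the explicit partition into two lists plus two separate sorts with a single keyed sort whose key (len(x) != 3, x) places the length-3 group first and orders each group lexicographically.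
import Mathlib
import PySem

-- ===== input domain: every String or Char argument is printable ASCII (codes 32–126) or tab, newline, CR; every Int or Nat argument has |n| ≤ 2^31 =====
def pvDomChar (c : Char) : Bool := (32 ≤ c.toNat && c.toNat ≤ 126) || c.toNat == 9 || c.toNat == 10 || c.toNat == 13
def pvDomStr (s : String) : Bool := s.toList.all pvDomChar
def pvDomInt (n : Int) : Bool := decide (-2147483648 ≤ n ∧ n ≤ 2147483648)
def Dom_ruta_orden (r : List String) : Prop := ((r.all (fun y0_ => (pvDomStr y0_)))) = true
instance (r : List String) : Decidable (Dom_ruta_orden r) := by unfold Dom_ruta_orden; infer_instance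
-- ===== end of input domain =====

-- B replaces A's partition-into-two-lists plus two sorts by one keyed sort (key = (len(x) != 3, x)); objective: simpler.

-- ===== PORT A =====
def ruta_orden (r : List String) : List String :=
  -- parte_a = []; parte_b = []
  let parte_a : List String := []
  let parte_b : List String := []
  if r.length > 0 then
    -- for x in r: append to parte_a if len(x) == 3 else to parte_b
    let p := r.foldl
      (fun acc x => if PySem.Str.len x == 3 then (acc.1 ++ [x], acc.2) else (acc.1, acc.2 ++ [x]))
      (parte_a, parte_b)
    -- parte_a.sort(); parte_b.sort(); return parte_a + parte_b
    PySem.List.sorted p.1 (fun x => x) ++ PySem.List.sorted p.2 (fun x => x)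
  else
    parte_a ++ parte_b

-- ===== PORT B =====
def ruta_orden_alt (r : List String) : List String :=
  -- sorted(r, key=lambda x: (len(x) != 3, x))
  PySem.List.sorted2 r (fun x => decide (PySem.Str.len x ≠ 3)) (fun x => x)

-- ===== PRECONDITION & SPEC =====
def Spec_ruta_orden (r : List String) (out : List String) : Prop := out = ruta_orden_alt r
instance (r : List String) (out : List String) : Decidable (Spec_ruta_orden r out) := by unfold Spec_ruta_orden; infer_instance

-- ===== CLAIM (what is proved, stated in full; the proofs are below) =====
def Claim_equal_ruta_orden : Prop := ∀ (r : List String), Dom_ruta_orden r → Spec_ruta_orden r (ruta_orden r)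

-- ===== LEMMAS AND PROOFS =====

-- the lexicographic key B sorts by, as a single linearly ordered value
def pvKey (x : String) : Lex (Bool × String) := toLex (decide (PySem.Str.len x ≠ 3), x)

theorem pvKey_injective : Function.Injective pvKey := by
  intro x y h
  have := congrArg (fun z : Lex (Bool × String) => (ofLex z).2) h
  simpa [pvKey] using this

theorem alt_eq_sorted_key (r : List String) :
    ruta_orden_alt r = PySem.List.sorted r pvKey := by
  rw [PySem.List.sorted_eq_foldl_insertBy]
  show List.foldl _ [] r = _
  congr 1
  funext acc x
  congr 1
  funext a b
  by_cases hA : PySem.Str.len a = 3 <;> by_cases hB : PySem.Str.len b = 3 <;>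
    · simp [PySem.Str.len] at hA hB
      simp [pvKey, Prod.Lex.lt_iff, PySem.Str.len, hA, hB]

theorem part_foldl (r : List String) (a b : List String) :
    r.foldl
      (fun acc x => if PySem.Str.len x == 3 then (acc.1 ++ [x], acc.2) else (acc.1, acc.2 ++ [x]))
      (a, b)
    = (a ++ r.filter (fun x => PySem.Str.len x == 3),
       b ++ r.filter (fun x => !(PySem.Str.len x == 3))) := by
  induction r generalizing a b with
  | nil => simp
  | cons x t ih =>
      rw [List.foldl_cons, List.filter_cons, List.filter_cons]
      by_cases h : (PySem.Str.len x == 3) = true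
      · rw [if_pos h, ih]
        have h' : (x.length : Int) = 3 := by simpa [PySem.Str.len] using h
        simp [h']
      · rw [if_neg h, ih]
        have h' : ¬ (x.length : Int) = 3 := by simpa [PySem.Str.len] using h
        simp [h']

theorem pvKey_le_of_both_len3 {x y : String}
    (hx : PySem.Str.len x = 3) (hy : PySem.Str.len y = 3)
    (hxy : x ≤ y) : pvKey x ≤ pvKey y := by
  simp [PySem.Str.len] at hx hy
  rw [Prod.Lex.le_iff]; right; simp [pvKey, PySem.Str.len, hx, hy, hxy]

theorem pvKey_le_of_both_not_len3 {x y : String}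
    (hx : ¬ PySem.Str.len x = 3) (hy : ¬ PySem.Str.len y = 3)
    (hxy : x ≤ y) : pvKey x ≤ pvKey y := by
  simp [PySem.Str.len] at hx hy
  rw [Prod.Lex.le_iff]; right; simp [pvKey, PySem.Str.len, hx, hy, hxy]

theorem pvKey_le_of_len3_not_len3 {x y : String}
    (hx : PySem.Str.len x = 3) (hy : ¬ PySem.Str.len y = 3) :
    pvKey x ≤ pvKey y := by
  simp [PySem.Str.len] at hx hy
  rw [Prod.Lex.le_iff]; left; simp [pvKey, PySem.Str.len, hx, hy]

-- ===== VERDICT (by name: the statement is the Claim_ definition above) =====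
theorem ruta_orden_spec : Claim_equal_ruta_orden := by
  intro r _
  unfold Spec_ruta_orden
  by_cases hr : r = []
  · subst hr; rfl
  · have hlen : r.length > 0 := List.length_pos_iff.mpr hr
    rw [alt_eq_sorted_key]
    show ruta_orden r = _
    unfold ruta_orden
    rw [if_pos hlen, part_foldl]
    simp only [List.nil_append]
    set P : String → Bool := fun x => PySem.Str.len x == 3 with hP
    set pa := r.filter P with hpa
    set pb := r.filter (fun x => !(P x)) with hpb
    have hmem_a : ∀ x ∈ PySem.List.sorted pa (fun x => x), PySem.Str.len x = 3 := by
      intro x hx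
      have hm : x ∈ pa := (PySem.List.mem_sorted _ _ _ _).1 hx
      have := List.of_mem_filter hm
      simp_all
    have hmem_b : ∀ x ∈ PySem.List.sorted pb (fun x => x), ¬ PySem.Str.len x = 3 := by
      intro x hx
      have hm : x ∈ pb := (PySem.List.mem_sorted _ _ _ _).1 hx
      have := List.of_mem_filter hm
      simp_all
    apply PySem.List.eq_of_perm_of_pairwise_le_of_injective pvKey pvKey_injective
    · exact ((PySem.List.sorted_perm _ _ _).append (PySem.List.sorted_perm _ _ _)).trans
        ((List.filter_append_perm P r).trans (PySem.List.sorted_perm r pvKey false).symm)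
    · rw [List.pairwise_append]
      refine ⟨?_, ?_, ?_⟩
      · exact (PySem.List.sorted_pairwise pa (fun x => x)).imp_of_mem
          (fun hx hy h => pvKey_le_of_both_len3 (hmem_a _ hx) (hmem_a _ hy) h)
      · exact (PySem.List.sorted_pairwise pb (fun x => x)).imp_of_mem
          (fun hx hy h => pvKey_le_of_both_not_len3 (hmem_b _ hx) (hmem_b _ hy) h)
      · intro x hx y hy
        exact pvKey_le_of_len3_not_len3 (hmem_a _ hx) (hmem_b _ hy)
    · exact PySem.List.sorted_pairwise r pvKey
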